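-- pv_equiv track=rewrite | github.com/iammoda/coding_problems | test_questions/tests.py | printArray
-- ===== SOURCE A (Python) =====
-- def printArray(array):
--
-- 	list = []
-- 	s_column, e_column = 0, len(array[0]) - 1
-- 	s_row, e_row = 0, len(array) -1
--
-- 	while e_row >= s_row:
--
-- 		for col in range(s_column, e_column + 1):
-- 			if e_row >= s_row:
-- 				list.append(array[s_row][col])
-- 		s_row +=1
--
-- 		for col in reversed(range(s_column, e_column +1)):
-- 			if e_row >= s_row:
-- 				list.append(array[s_row][col])
-- 		s_row +=1
--
-- 	return list
-- ===== SOURCE B (Python) =====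
-- def printArray(array):
--     cols = len(array[0])
--     return [array[q][c if q % 2 == 0 else cols - 1 - c]
--             for q, c in (divmod(k, cols) for k in range(len(array) * cols))]
-- ===== Notes on version B (the rewrite author's own statement) =====
-- stated objective: alternative
-- what changed: Replaces A's pointer-based while loop with two unrolled inner column passes by a single flat comprehension over range(rows*cols) that computes each output position's (row, column) by divmod index arithmetic, reflecting the column on odd rows.
import Mathlib
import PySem

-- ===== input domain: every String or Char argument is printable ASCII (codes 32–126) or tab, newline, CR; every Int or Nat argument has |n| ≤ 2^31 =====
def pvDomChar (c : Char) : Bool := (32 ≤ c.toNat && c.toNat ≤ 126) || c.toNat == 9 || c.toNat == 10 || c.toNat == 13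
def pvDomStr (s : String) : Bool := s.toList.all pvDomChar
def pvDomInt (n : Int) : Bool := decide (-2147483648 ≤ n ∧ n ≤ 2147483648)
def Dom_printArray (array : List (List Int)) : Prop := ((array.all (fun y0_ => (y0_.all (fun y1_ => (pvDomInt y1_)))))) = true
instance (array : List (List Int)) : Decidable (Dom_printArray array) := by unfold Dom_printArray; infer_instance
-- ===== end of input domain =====

-- B replaces A's pointer-based while loop (two unrolled inner passes with redundant guards)
-- by one flat pass over range(rows*cols) computing each position by divmod index arithmetic
-- (objective: alternative decomposition, same cost).

-- ===== PORT A =====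
-- array[s_row][col] under Pre_ (indices in range); default never reached inside Pre_
def pvGetA (array : List (List Int)) (s : Int) (c : Nat) : Int :=
  (array.getD s.toNat []).getD c 0

-- while-loop body; fuel = number of rows bounds the iterations (totality guard only)
def printArrayLoop (array : List (List Int)) (cols : Nat) (eRow : Int) (fuel : Nat)
    (sRow : Int) (acc : List Int) : List Int :=
  match fuel with
  | 0 => acc
  | fuel + 1 =>
    if eRow ≥ sRow then
      let acc1 := (List.range cols).foldl
        (fun a c => if eRow ≥ sRow then a ++ [pvGetA array sRow c] else a) acc
      let s1 := sRow + 1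
      let acc2 := ((List.range cols).reverse).foldl
        (fun a c => if eRow ≥ s1 then a ++ [pvGetA array s1 c] else a) acc1
      printArrayLoop array cols eRow fuel (s1 + 1) acc2
    else acc

def printArray (array : List (List Int)) : List Int :=
  let cols := (array.headD []).length
  printArrayLoop array cols ((array.length : Int) - 1) array.length 0 []

-- ===== PORT B =====
-- one flat comprehension over range(rows*cols); q, c = divmod(k, cols) (k ≥ 0, so Nat / and % are exact)
def printArray_alt (array : List (List Int)) : List Int :=
  let cols := (array.headD []).length
  (List.range (array.length * cols)).map (fun k =>
    (array.getD (k / cols) []).getD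
      (if (k / cols) % 2 == 0 then k % cols else cols - 1 - k % cols) 0)

-- ===== PRECONDITION & SPEC =====
-- Pre_ excludes exactly the inputs where Python A raises IndexError: the empty array
-- (len(array[0])) and arrays with a row shorter than the first row (array[s_row][col]).
def Pre_printArray (array : List (List Int)) : Prop :=
  array ≠ [] ∧ ∀ row ∈ array, (array.headD []).length ≤ row.length
instance (array : List (List Int)) : Decidable (Pre_printArray array) := by
  unfold Pre_printArray; infer_instance
def pvWitness_printArray : List (List Int) := [[1, 2, 3], [4, 5, 6], [7, 8, 9]]

def Spec_printArray (array : List (List Int)) (out : List Int) : Prop := out = printArray_alt array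
instance (array : List (List Int)) (out : List Int) : Decidable (Spec_printArray array out) := by unfold Spec_printArray; infer_instance

-- ===== CLAIM (what is proved, stated in full; the proofs are below) =====
def Claim_equal_printArray : Prop := ∀ (array : List (List Int)), Dom_printArray array → Pre_printArray array → Spec_printArray array (printArray array)

-- ===== LEMMAS AND PROOFS =====

-- zigzag contribution of one enumerated row (intermediate form both ports are reduced to)
def pvRowZ (cols : Nat) (p : Int × List Int) : List Int :=
  (if p.1 % 2 == 0 then List.range cols else (List.range cols).reverse).map
    (fun c => p.2.getD c 0)

lemma foldl_guard_true {α : Type} (f : Nat → α) (P : Prop) [Decidable P] (hP : P) :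
    ∀ (l : List Nat) (acc : List α),
      l.foldl (fun a c => if P then a ++ [f c] else a) acc = acc ++ l.map f := by
  intro l
  induction l with
  | nil => intro acc; simp
  | cons x xs ih => intro acc; rw [List.foldl_cons, if_pos hP, ih]; simp

lemma foldl_guard_false {α : Type} (f : Nat → α) (P : Prop) [Decidable P] (hP : ¬ P) :
    ∀ (l : List Nat) (acc : List α),
      l.foldl (fun a c => if P then a ++ [f c] else a) acc = acc := by
  intro l
  induction l with
  | nil => intro acc; rfl
  | cons x xs ih => intro acc; rw [List.foldl_cons, if_neg hP, ih]

lemma loop_stop (array : List (List Int)) (cols : Nat) (fuel : Nat) (sRow : Int)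
    (h : ¬ ((array.length : Int) - 1) ≥ sRow) (acc : List Int) :
    printArrayLoop array cols ((array.length : Int) - 1) fuel sRow acc = acc := by
  cases fuel with
  | zero => rfl
  | succ n => rw [printArrayLoop, if_neg h]

lemma key (array : List (List Int)) (cols : Nat) :
    ∀ (fuel s : Nat), array.length ≤ s + 2 * fuel → s % 2 = 0 → ∀ (acc : List Int),
      printArrayLoop array cols ((array.length : Int) - 1) fuel (s : Int) acc
        = acc ++ (PySem.List.enumerate (array.drop s) (s : Int)).flatMap (pvRowZ cols) := by
  intro fuel
  induction fuel with
  | zero =>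
    intro s hn hs acc
    rw [printArrayLoop]
    rw [List.drop_eq_nil_of_le (by omega), PySem.List.enumerate_nil]
    simp
  | succ n ih =>
    intro s hn hs acc
    by_cases hlt : s < array.length
    · rw [printArrayLoop]
      rw [if_pos (by omega : ((array.length : Int) - 1) ≥ (s : Int))]
      have hdrop : array.drop s = array[s] :: array.drop (s + 1) :=
        List.drop_eq_getElem_cons hlt
      rw [foldl_guard_true (fun c => pvGetA array (s : Int) c) _
            (by omega : ((array.length : Int) - 1) ≥ (s : Int))]
      have hget : ∀ (t : Nat) (ht : t < array.length),
          (fun c => pvGetA array (t : Int) c) = (fun c => array[t].getD c 0) := by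
        intro t ht
        funext c
        simp [pvGetA, List.getD, List.getElem?_eq_getElem ht]
      rw [hget s hlt]
      dsimp only
      have hsrow : pvRowZ cols ((s : Int), array[s]) = (List.range cols).map (fun c => array[s].getD c 0) := by
        have : ((s : Int)) % 2 = 0 := by omega
        simp [pvRowZ, this]
      by_cases hlt1 : s + 1 < array.length
      · -- second row also appended
        rw [foldl_guard_true (fun c => pvGetA array ((s : Int) + 1) c) _
              (by omega : ((array.length : Int) - 1) ≥ (s : Int) + 1)]
        have hcast : ((s : Int) + 1) = ((s + 1 : Nat) : Int) := by push_cast; ring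
        rw [hcast, hget (s + 1) hlt1]
        have hrec : ((s + 1 : Nat) : Int) + 1 = ((s + 2 : Nat) : Int) := by push_cast; ring
        rw [hrec]
        have hn2 : array.length ≤ (s + 2) + 2 * n := by omega
        rw [ih (s + 2) hn2 (by omega)]
        have hdrop1 : array.drop (s + 1) = array[s + 1] :: array.drop (s + 2) :=
          List.drop_eq_getElem_cons hlt1
        rw [hdrop, hdrop1, PySem.List.enumerate_cons, PySem.List.enumerate_cons]
        have hodd : pvRowZ cols ((s : Int) + 1, array[s + 1])
            = (List.range cols).reverse.map (fun c => array[s + 1].getD c 0) := by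
          have h2 : ((s : Int) + 1) % 2 = 1 := by omega
          simp [pvRowZ, h2]
        simp [List.flatMap_cons, hsrow, hodd, List.append_assoc]
        ring_nf
      · -- s is the last row
        have hlen : array.length = s + 1 := by omega
        rw [foldl_guard_false (fun c => pvGetA array ((s : Int) + 1) c) _
              (by omega : ¬ ((array.length : Int) - 1) ≥ (s : Int) + 1)]
        rw [loop_stop array cols n ((s : Int) + 1 + 1)
              (by omega : ¬ ((array.length : Int) - 1) ≥ (s : Int) + 1 + 1)]
        have hdrop2 : array.drop (s + 1) = [] := by
          apply List.drop_eq_nil_of_le; omega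
        rw [hdrop, hdrop2, PySem.List.enumerate_cons, PySem.List.enumerate_nil]
        simp [List.flatMap_cons, hsrow]
    · -- no rows left
      rw [loop_stop array cols (n + 1) (s : Int)
            (by omega : ¬ ((array.length : Int) - 1) ≥ (s : Int))]
      rw [List.drop_eq_nil_of_le (by omega), PySem.List.enumerate_nil]
      simp

-- reversed range as a reflected range
lemma rev_range_map {α : Type} (cols : Nat) (f : Nat → α) :
    (List.range cols).map (fun c => f (cols - 1 - c)) = ((List.range cols).reverse).map f := by
  apply List.ext_getElem
  · simp
  · intro i h1 h2
    simp only [List.length_map, List.length_range] at h1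
    simp only [List.getElem_map, List.getElem_reverse, List.getElem_range, List.length_range]

-- flat index pass over range (n*cols) splits into one block of cols per row
lemma flat_split (cols : Nat) (g : Nat → Nat → Int) :
    ∀ (n : Nat),
      (List.range (n * cols)).map (fun k => g (k / cols) (k % cols))
        = (List.range n).flatMap (fun q => (List.range cols).map (g q)) := by
  intro n
  induction n with
  | zero => simp
  | succ m ih =>
    rw [Nat.succ_mul, List.range_add, List.map_append, ih, List.range_succ,
        List.flatMap_append]
    congr 1
    rcases Nat.eq_zero_or_pos cols with h0 | hpos
    · simp [h0]
    · simp only [List.map_map, List.flatMap_cons, List.flatMap_nil, List.append_nil]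
      apply List.map_congr_left
      intro c hc
      have hc' : c < cols := List.mem_range.mp hc
      have hd : (m * cols + c) / cols = m := by
        rw [Nat.mul_comm m cols, Nat.mul_add_div hpos, Nat.div_eq_of_lt hc', Nat.add_zero]
      have hm : (m * cols + c) % cols = c := by
        rw [Nat.mul_comm m cols, Nat.mul_add_mod, Nat.mod_eq_of_lt hc']
      simp [Function.comp, hd, hm]

-- the flat pass equals the enumerate flatMap form
lemma alt_eq_enum (array : List (List Int)) :
    printArray_alt array
      = (PySem.List.enumerate array 0).flatMap (pvRowZ (array.headD []).length) := by
  set cols := (array.headD []).length with hcols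
  have hflat := flat_split cols
    (fun q c => (array.getD q []).getD (if q % 2 == 0 then c else cols - 1 - c) 0)
    array.length
  unfold printArray_alt
  rw [← hcols, hflat]
  -- now both sides are per-row; induct over the list generalizing the start
  suffices h : ∀ (l : List (List Int)) (s : Nat),
      (List.range l.length).flatMap (fun q =>
        (List.range cols).map (fun c =>
          (l.getD q []).getD (if (s + q) % 2 == 0 then c else cols - 1 - c) 0))
        = (PySem.List.enumerate l (s : Int)).flatMap (pvRowZ cols) by
    have := h array 0
    simpa using this
  intro l
  induction l with
  | nil => intro s; simp [PySem.List.enumerate_nil]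
  | cons x xs ih =>
    intro s
    rw [PySem.List.enumerate_cons, List.flatMap_cons]
    have hlen : (x :: xs).length = xs.length + 1 := rfl
    rw [hlen, List.range_succ_eq_map, List.flatMap_cons, List.flatMap_map]
    congr 1
    · -- head row
      by_cases he : s % 2 = 0
      · have h1 : (s + 0) % 2 == 0 := by simp [he]
        have h2 : ((s : Int)) % 2 == 0 := by
          have : ((s : Int)) % 2 = 0 := by omega
          simp [this]
        simp [pvRowZ, he, h2]
      · have h2 : ¬ (((s : Int)) % 2 == 0) := by
          have : ((s : Int)) % 2 = 1 := by omega
          simp [this]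
        simp [pvRowZ, he, h2]
        rw [← List.map_reverse]
        exact rev_range_map cols (fun c => x[c]?.getD 0)
    · -- tail rows
      have hcast : ((s : Int) + 1) = ((s + 1 : Nat) : Int) := by push_cast; ring
      rw [hcast, ← ih (s + 1)]
      apply List.flatMap_congr
      intro q hq
      have : s + (q + 1) = (s + 1) + q := by omega
      simp [this]

-- ===== VERDICT (by name: the statement is the Claim_ definition above) =====
theorem printArray_spec : Claim_equal_printArray := by
  intro array _ _
  unfold Spec_printArray printArray
  rw [alt_eq_enum]
  have h := key array (array.headD []).length array.length 0 (by omega) (by omega) []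
  simpa using h
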